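-- pv_equiv track=rewrite | github.com/quantumxiaol/umamusume-web-crawler | src/umamusume_web_crawler/web/crawler.py | _strip_json_blocks
-- ===== SOURCE A (Python) =====
-- def _strip_json_blocks(text: str, markers: tuple[str, ...]) -> str:
--     lines = text.splitlines()
--     cleaned: list[str] = []
--     skipping = False
--     depth = 0
--     for line in lines:
--         if skipping:
--             depth += line.count("[") - line.count("]")
--             if depth <= 0:
--                 skipping = False
--             continue
--         if any(marker in line for marker in markers):
--             depth = line.count("[") - line.count("]")
--             if depth > 0:
--                 skipping = True
--             continue
--         cleaned.append(line)
--     return "\n".join(cleaned)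
-- ===== SOURCE B (Python) =====
-- def _strip_json_blocks(text: str, markers: tuple[str, ...]) -> str:
--     lines = text.splitlines()
--     n = len(lines)
--     delta = [l.count("[") - l.count("]") for l in lines]
--     pref = [0]
--     s = 0
--     for d in delta:
--         s += d
--         pref.append(s)
--     keep = []
--     i = 0
--     while i < n:
--         line = lines[i]
--         if any(m in line for m in markers):
--             if delta[i] > 0:
--                 j = next((j for j in range(i, n) if pref[j + 1] - pref[i] <= 0), n - 1)
--                 i = j + 1
--             else:
--                 i += 1
--         else:
--             keep.append(line)
--             i += 1
--     return "\n".join(keep)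
-- ===== Notes on version B (the rewrite author's own statement) =====
-- stated objective: alternative
-- what changed: Replaces A's single-pass skipping/depth state machine with staged passes: B precomputes per-line bracket deltas and a prefix-sum array, then locates each block's end by searching for the first index where the prefix-sum difference drops to <= 0, keeping lines outside those intervals.
import Mathlib
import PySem

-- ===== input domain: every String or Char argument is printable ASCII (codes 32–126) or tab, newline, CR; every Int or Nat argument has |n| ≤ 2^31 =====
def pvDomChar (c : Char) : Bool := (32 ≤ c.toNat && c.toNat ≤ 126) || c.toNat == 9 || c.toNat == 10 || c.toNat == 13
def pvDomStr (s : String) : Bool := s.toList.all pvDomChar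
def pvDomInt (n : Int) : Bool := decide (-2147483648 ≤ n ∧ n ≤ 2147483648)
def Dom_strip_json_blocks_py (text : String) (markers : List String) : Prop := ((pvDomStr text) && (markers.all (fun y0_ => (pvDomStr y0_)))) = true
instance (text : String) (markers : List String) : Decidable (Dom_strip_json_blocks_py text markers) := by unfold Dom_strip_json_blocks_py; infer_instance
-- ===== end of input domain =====

-- B replaces A's running skipping/depth state machine with staged passes: it precomputes
-- per-line bracket deltas and a prefix-sum array, then finds each block's end by searching
-- for the first index where the prefix-sum difference drops to ≤ 0 (objective: alternative).

-- shared helpers: line.count("[") - line.count("]"), and 'any(marker in line for marker in markers)'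
def pvDelta (line : String) : Int :=
  (PySem.Str.count line "[" : Int) - (PySem.Str.count line "]" : Int)

def pvIsMarker (markers : List String) (line : String) : Bool :=
  markers.any (fun m => PySem.Str.isIn m line)

-- ===== PORT A =====
-- the for-loop body of A, over state (cleaned, skipping, depth)
def aStep (markers : List String) (st : List String × Bool × Int) (line : String) :
    List String × Bool × Int :=
  match st with
  | (cleaned, skipping, depth) =>
    if skipping then
      let depth := depth + pvDelta line
      if depth ≤ 0 then (cleaned, false, depth) else (cleaned, true, depth)
    else if pvIsMarker markers line then
      let depth := pvDelta line
      if depth > 0 then (cleaned, true, depth) else (cleaned, false, depth)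
    else (cleaned ++ [line], skipping, depth)

def strip_json_blocks_py (text : String) (markers : List String) : String :=
  PySem.Str.join "\n"
    (((PySem.Str.splitlines text).foldl (aStep markers) ([], false, 0)).1)

-- ===== PORT B =====
-- 'for d in delta: s += d; pref.append(s)' (running sum s carried through the recursion)
def bPrefs (s : Int) : List Int → List Int
  | [] => []
  | d :: ds => (s + d) :: bPrefs (s + d) ds

-- 'next((j for j in range(i, n) if pref[j+1]-pref[i] <= 0), n - 1)'
def bFindEnd (pref : List Int) (i n : Nat) : Nat :=
  ((List.range' i (n - i)).find?
    (fun j => decide (pref.getD (j + 1) 0 - pref.getD i 0 ≤ 0))).getD (n - 1)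

theorem bFindEnd_ge (pref : List Int) (i n : Nat) (h : i < n) : i ≤ bFindEnd pref i n := by
  unfold bFindEnd
  cases hf : (List.range' i (n - i)).find?
      (fun j => decide (pref.getD (j + 1) 0 - pref.getD i 0 ≤ 0)) with
  | none => simp [Option.getD]; omega
  | some j =>
    have hm := List.mem_of_find?_eq_some hf
    rw [List.mem_range'_1] at hm
    simpa using hm.1

-- the 'while i < n' loop of B
def bLoopIdx (markers lines : List String) (delta pref : List Int) (n i : Nat)
    (keep : List String) : List String :=
  if h : i < n then
    let line := lines.getD i ""
    if pvIsMarker markers line then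
      if 0 < delta.getD i 0 then
        bLoopIdx markers lines delta pref n (bFindEnd pref i n + 1) keep
      else
        bLoopIdx markers lines delta pref n (i + 1) keep
    else
      bLoopIdx markers lines delta pref n (i + 1) (keep ++ [line])
  else keep
termination_by n - i
decreasing_by
  · have := bFindEnd_ge pref i n h; omega
  · omega
  · omega

def strip_json_blocks_py_alt (text : String) (markers : List String) : String :=
  let lines := PySem.Str.splitlines text
  let delta := lines.map pvDelta
  let pref := 0 :: bPrefs 0 delta
  PySem.Str.join "\n" (bLoopIdx markers lines delta pref lines.length 0 [])

-- ===== PRECONDITION & SPEC =====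
def Spec_strip_json_blocks_py (text : String) (markers : List String) (out : String) : Prop := out = strip_json_blocks_py_alt text markers
instance (text : String) (markers : List String) (out : String) : Decidable (Spec_strip_json_blocks_py text markers out) := by unfold Spec_strip_json_blocks_py; infer_instance

-- ===== CLAIM (what is proved, stated in full; the proofs are below) =====
def Claim_equal_strip_json_blocks_py : Prop := ∀ (text : String) (markers : List String), Dom_strip_json_blocks_py text markers → Spec_strip_json_blocks_py text markers (strip_json_blocks_py text markers)

-- ===== LEMMAS AND PROOFS =====

-- Proof-side mid-point: the block-skipping recursion both programs compute.
def bConsume (depth : Int) : List String → List String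
  | [] => []
  | l :: rest => if depth > 0 then bConsume (depth + pvDelta l) rest else l :: rest

theorem bConsume_length_le (depth : Int) (ls : List String) :
    (bConsume depth ls).length ≤ ls.length := by
  induction ls generalizing depth with
  | nil => simp [bConsume]
  | cons l rest ih =>
    simp only [bConsume]
    split
    · exact le_trans (ih _) (Nat.le_succ _)
    · simp

def bLoop (markers : List String) : List String → List String
  | [] => []
  | l :: rest =>
    if pvIsMarker markers l then
      bLoop markers (bConsume (pvDelta l) rest)
    else
      l :: bLoop markers rest
termination_by ls => ls.length
decreasing_by
  · exact Nat.lt_succ_of_le (bConsume_length_le _ _)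
  · simp

-- number of lines bConsume drops
def bCount (depth : Int) : List String → Nat
  | [] => 0
  | l :: rest => if depth > 0 then bCount (depth + pvDelta l) rest + 1 else 0

theorem bCount_le (depth : Int) (ls : List String) : bCount depth ls ≤ ls.length := by
  induction ls generalizing depth with
  | nil => simp [bCount]
  | cons l rest ih =>
    simp only [bCount]
    split
    · simpa using ih _
    · simp

theorem bConsume_eq_drop (depth : Int) (ls : List String) :
    bConsume depth ls = ls.drop (bCount depth ls) := by
  induction ls generalizing depth with
  | nil => simp [bConsume, bCount]
  | cons l rest ih =>
    simp only [bConsume, bCount]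
    split
    · simpa using ih _
    · simp

-- A's fold from a non-skipping state computes bLoop; from a skipping state with positive
-- depth it computes bLoop after bConsume-ing the block.  Proved together by induction.
theorem aFold_eq_bLoop (markers : List String) (lines : List String) :
    (∀ acc d, (lines.foldl (aStep markers) (acc, false, d)).1 = acc ++ bLoop markers lines) ∧
    (∀ acc d, 0 < d →
      (lines.foldl (aStep markers) (acc, true, d)).1
        = acc ++ bLoop markers (bConsume d lines)) := by
  induction lines with
  | nil => simp [bLoop, bConsume]
  | cons l rest ih =>
    constructor
    · intro acc d
      by_cases hm : pvIsMarker markers l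
      · by_cases hd : 0 < pvDelta l
        · rw [List.foldl_cons]
          simp only [aStep, hm, hd, Bool.false_eq_true, if_false, if_true]
          rw [bLoop]
          simp only [hm, if_true]
          exact ih.2 acc _ hd
        · rw [List.foldl_cons]
          simp only [aStep, hm, hd, Bool.false_eq_true, if_false, if_true]
          rw [bLoop]
          simp only [hm, if_true]
          rw [show bConsume (pvDelta l) rest = rest by
            cases rest with
            | nil => rfl
            | cons x xs => simp [bConsume, hd]]
          exact ih.1 acc (pvDelta l)
      · rw [List.foldl_cons]
        simp only [aStep, hm, Bool.false_eq_true, if_false]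
        rw [bLoop]
        simp only [hm, Bool.false_eq_true, if_false]
        rw [ih.1 (acc ++ [l]) d]
        simp
    · intro acc d hd
      rw [List.foldl_cons]
      simp only [aStep, if_true]
      rw [show bConsume d (l :: rest) = bConsume (d + pvDelta l) rest by
        simp [bConsume, hd]]
      by_cases h0 : d + pvDelta l ≤ 0
      · simp only [h0, if_true]
        rw [show bConsume (d + pvDelta l) rest = rest by
          cases rest with
          | nil => rfl
          | cons x xs => simp [bConsume]; omega]
        exact ih.1 acc _
      · simp only [h0, if_false]
        exact ih.2 acc _ (by omega)

-- find? respects pointwise-equal predicates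
theorem find?_congr' {α : Type} (l : List α) (p q : α → Bool)
    (h : ∀ x ∈ l, p x = q x) : l.find? p = l.find? q := by
  induction l with
  | nil => rfl
  | cons a l ih =>
    simp only [List.find?_cons]
    rw [h a (by simp)]
    cases q a
    · exact ih (fun x hx => h x (by simp [hx]))
    · rfl

-- the prefix-sum search from depth d finds exactly the line where bCount stops
theorem findEnd_eq_bCount (strs : List String) : ∀ (a : Nat) (d : Int), 0 < d →
    ((List.range' a (strs.length + 1)).find?
      (fun j => decide (d + ((strs.map pvDelta).take (j - a)).sum ≤ 0))).getD (a + strs.length)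
    = a + bCount d strs := by
  induction strs with
  | nil =>
    intro a d hd
    rw [show ([] : List String).length + 1 = 1 by rfl, List.range'_one]
    rw [List.find?_cons_of_neg (by simp; omega)]
    simp [bCount]
  | cons l rest ih =>
    intro a d hd
    rw [show (l :: rest).length + 1 = (rest.length + 1) + 1 by simp, List.range'_succ]
    rw [List.find?_cons_of_neg (by simp; omega)]
    have hshift : ((List.range' (a + 1) (rest.length + 1)).find?
        (fun j => decide (d + (((l :: rest).map pvDelta).take (j - a)).sum ≤ 0)))
      = ((List.range' (a + 1) (rest.length + 1)).find?
        (fun j => decide ((d + pvDelta l) + ((rest.map pvDelta).take (j - (a + 1))).sum ≤ 0))) := by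
      apply find?_congr'
      intro j hj
      rw [List.mem_range'_1] at hj
      have hj1 : j - a = (j - (a + 1)) + 1 := by omega
      rw [hj1]
      simp [List.take_succ_cons, add_assoc]
    rw [hshift]
    by_cases hdl : 0 < d + pvDelta l
    · rw [show a + (l :: rest).length = (a + 1) + rest.length by simp; omega]
      rw [ih (a + 1) (d + pvDelta l) hdl]
      simp [bCount, hd]
      omega
    · rw [List.range'_succ, List.find?_cons_of_pos (by simp; omega)]
      have h0 : bCount (d + pvDelta l) rest = 0 := by
        cases rest with
        | nil => rfl
        | cons x xs => simp [bCount]; omega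
      simp [bCount, hd, h0]

-- value of the prefix array built by B
theorem bPrefs_getD (ds : List Int) : ∀ (s : Int) (k : Nat), k < ds.length →
    (bPrefs s ds).getD k 0 = s + (ds.take (k + 1)).sum := by
  induction ds with
  | nil => intro s k h; simp at h
  | cons d ds ih =>
    intro s k h
    cases k with
    | zero => simp [bPrefs]
    | succ k =>
      simp only [bPrefs, List.getD_cons_succ]
      rw [ih (s + d) k (by simpa using h)]
      simp [add_assoc]

theorem pref_getD (ds : List Int) (k : Nat) (hk : k ≤ ds.length) :
    (0 :: bPrefs 0 ds).getD k 0 = (ds.take k).sum := by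
  cases k with
  | zero => simp
  | succ k =>
    simp only [List.getD_cons_succ]
    rw [bPrefs_getD ds 0 k (by omega)]
    simp

-- B's index loop computes keep ++ bLoop on the remaining lines
theorem bLoopIdx_eq (markers lines : List String) : ∀ (fuel i : Nat),
    lines.length - i ≤ fuel → ∀ keep : List String,
    bLoopIdx markers lines (lines.map pvDelta) (0 :: bPrefs 0 (lines.map pvDelta))
      lines.length i keep
    = keep ++ bLoop markers (lines.drop i) := by
  intro fuel
  induction fuel with
  | zero =>
    intro i hfi keep
    have h : ¬ i < lines.length := by omega
    rw [bLoopIdx, dif_neg h, List.drop_eq_nil_of_le (by omega)]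
    simp [bLoop]
  | succ fuel ih =>
    intro i hfi keep
    by_cases h : i < lines.length
    · have hdrop : lines.drop i = lines[i] :: lines.drop (i + 1) :=
        List.drop_eq_getElem_cons h
      have hget : lines.getD i "" = lines[i] := List.getD_eq_getElem lines "" h
      have hdget : (lines.map pvDelta).getD i 0 = pvDelta lines[i] := by
        rw [List.getD_eq_getElem _ 0 (by simpa using h)]
        simp
      rw [bLoopIdx, dif_pos h]
      simp only [hget, hdget]
      by_cases hm : pvIsMarker markers lines[i]
      · rw [if_pos hm]
        by_cases hd : 0 < pvDelta lines[i]
        · rw [if_pos hd]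
          have hfe : bFindEnd (0 :: bPrefs 0 (lines.map pvDelta)) i lines.length
              = i + bCount (pvDelta lines[i]) (lines.drop (i + 1)) := by
            unfold bFindEnd
            have hlen : lines.length - i = (lines.drop (i + 1)).length + 1 := by
              simp; omega
            rw [hlen]
            have hpred : ((List.range' i ((lines.drop (i + 1)).length + 1)).find?
                (fun j => decide ((0 :: bPrefs 0 (lines.map pvDelta)).getD (j + 1) 0
                  - (0 :: bPrefs 0 (lines.map pvDelta)).getD i 0 ≤ 0)))
              = ((List.range' i ((lines.drop (i + 1)).length + 1)).find?
                (fun j => decide (pvDelta lines[i]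
                  + (((lines.drop (i + 1)).map pvDelta).take (j - i)).sum ≤ 0))) := by
              apply find?_congr'
              intro j hj
              rw [List.mem_range'_1] at hj
              have hji : i ≤ j := hj.1
              have hjn : j < lines.length := by
                have := hj.2
                have hl : (lines.drop (i + 1)).length = lines.length - (i + 1) := by simp
                omega
              rw [pref_getD _ (j + 1) (by simp; omega), pref_getD _ i (by simp; omega)]
              have htake : ((lines.map pvDelta).take (j + 1)).sum
                  = ((lines.map pvDelta).take i).sum + (pvDelta lines[i]
                    + (((lines.drop (i + 1)).map pvDelta).take (j - i)).sum) := by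
                rw [show j + 1 = i + (j - i + 1) by omega, List.take_add]
                have hdropmap : (lines.map pvDelta).drop i
                    = pvDelta lines[i] :: (lines.drop (i + 1)).map pvDelta := by
                  rw [List.drop_eq_getElem_cons (by simpa using h)]
                  simp [List.map_drop]
                rw [List.sum_append, hdropmap, List.take_succ_cons]
                simp
              have hsum : ((lines.map pvDelta).take (j + 1)).sum
                  - ((lines.map pvDelta).take i).sum
                  = pvDelta lines[i]
                    + (((lines.drop (i + 1)).map pvDelta).take (j - i)).sum := by
                rw [htake]; ring
              rw [hsum]
            rw [hpred]
            rw [show lines.length - 1 = i + (lines.drop (i + 1)).length by simp; omega]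
            exact findEnd_eq_bCount (lines.drop (i + 1)) i (pvDelta lines[i]) hd
          rw [hfe]
          have hcnt : bCount (pvDelta lines[i]) (lines.drop (i + 1))
              ≤ (lines.drop (i + 1)).length :=
            bCount_le (pvDelta lines[i]) (lines.drop (i + 1))
          have hl2 : (lines.drop (i + 1)).length = lines.length - (i + 1) := by simp
          rw [ih (i + bCount (pvDelta lines[i]) (lines.drop (i + 1)) + 1) (by omega) keep]
          rw [hdrop, bLoop, if_pos hm, bConsume_eq_drop, List.drop_drop]
          congr 3
          omega
        · rw [if_neg hd]
          rw [ih (i + 1) (by omega) keep]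
          rw [hdrop, bLoop, if_pos hm]
          rw [show bConsume (pvDelta lines[i]) (lines.drop (i + 1)) = lines.drop (i + 1) by
            cases hc : lines.drop (i + 1) with
            | nil => rfl
            | cons x xs => simp [bConsume]; omega]
      · rw [if_neg hm]
        rw [ih (i + 1) (by omega) (keep ++ [lines[i]])]
        rw [hdrop, bLoop, if_neg hm]
        simp
    · rw [bLoopIdx, dif_neg h, List.drop_eq_nil_of_le (by omega)]
      simp [bLoop]

-- ===== VERDICT (by name: the statement is the Claim_ definition above) =====
theorem strip_json_blocks_py_spec : Claim_equal_strip_json_blocks_py := by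
  intro text markers _
  unfold Spec_strip_json_blocks_py strip_json_blocks_py strip_json_blocks_py_alt
  dsimp only
  rw [(aFold_eq_bLoop markers (PySem.Str.splitlines text)).1 [] 0]
  rw [bLoopIdx_eq markers (PySem.Str.splitlines text) (PySem.Str.splitlines text).length 0 (by omega) []]
  simp
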